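-- pv_equiv track=rewrite | github.com/petrosmp/theoria_plhroforias_kwdikopoihsh | homework2/ex_1.py | dehuffman
-- ===== SOURCE A (Python) =====
-- def dehuffman(encoded, codebook):
--     decoded = []
--     tmp = ""
--     for char in encoded:
--         tmp += char
--         if tmp in codebook:
--             decoded.append(codebook.index(tmp)+1)
--             tmp = ""
--     return decoded
-- ===== SOURCE B (Python) =====
-- def dehuffman(encoded, codebook):
--     # Build a trie over the codebook; each terminal node stores the FIRST index
--     # of that exact codeword.  Then decode in one pass over `encoded`.
--     root = {}
--     i = 0
--     for word in codebook:
--         node = root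
--         for ch in word:
--             node = node.setdefault(ch, {})
--         if None not in node:
--             node[None] = i
--         i += 1
--     decoded = []
--     node = root  # None means we fell off the trie: no codeword can ever match again
--     for ch in encoded:
--         if node is None:
--             continue
--         child = node.get(ch)
--         if child is None:
--             node = None
--         elif None in child:
--             decoded.append(child[None] + 1)
--             node = root
--         else:
--             node = child
--     return decoded
-- ===== Notes on version B (the rewrite author's own statement) =====
-- stated objective: faster
-- what changed: B builds a trie over the codebook once and decodes in a single walk (resetting to the root on each emitted codeword, going permanently dead when the prefix leaves the trie), instead of A's per-character linear membership scan plus .index scan of the codebook.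
import Mathlib
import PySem

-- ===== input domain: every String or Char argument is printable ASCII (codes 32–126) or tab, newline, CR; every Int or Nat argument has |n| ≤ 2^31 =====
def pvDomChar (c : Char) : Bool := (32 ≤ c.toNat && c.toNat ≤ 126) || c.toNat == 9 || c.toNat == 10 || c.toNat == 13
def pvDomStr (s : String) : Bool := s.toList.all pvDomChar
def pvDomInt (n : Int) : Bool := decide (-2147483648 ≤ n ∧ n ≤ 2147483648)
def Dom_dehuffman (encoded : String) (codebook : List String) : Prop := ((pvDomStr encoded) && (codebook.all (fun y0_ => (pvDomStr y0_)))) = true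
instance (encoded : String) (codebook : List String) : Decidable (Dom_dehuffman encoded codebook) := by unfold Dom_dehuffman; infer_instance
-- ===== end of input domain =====

-- B replaces A's per-character membership scan of the codebook by a trie built once,
-- walked in a single pass over the encoded string (objective: faster).

-- ===== PORT A =====
-- one iteration of A's for-loop; state = (decoded, tmp)
def dehuffmanStepA (codebook : List String) (st : List Int × String) (c : Char) : List Int × String :=
  let tmp := st.2.push c
  if codebook.contains tmp then
    -- `codebook.index(tmp)` cannot fail here: the branch guard is `tmp in codebook`
    (st.1 ++ [(((PySem.List.index? codebook tmp).getD 0 : Nat) : Int) + 1], "")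
  else
    (st.1, tmp)

def dehuffman (encoded : String) (codebook : List String) : List Int :=
  (encoded.toList.foldl (dehuffmanStepA codebook) ([], "")).1

-- ===== PORT B =====
-- trie node: optional stored codeword index, children as an ordered Char-keyed list
mutual
inductive PTrie : Type where
  | node : Option Nat → PChildren → PTrie
inductive PChildren : Type where
  | nil : PChildren
  | cons : Char → PTrie → PChildren → PChildren
end

-- `node.get(ch)` on the child dict
def findChild : PChildren → Char → Option PTrie
  | .nil, _ => none
  | .cons c t rest, c' => if c = c' then some t else findChild rest c'

mutual
-- insert one codeword (as chars) with its index; first index per codeword wins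
def trieInsert : PTrie → List Char → Nat → PTrie
  | .node m ch, [], i => .node (if m.isNone then some i else m) ch
  | .node m ch, c :: cs, i => .node m (childInsert ch c cs i)
termination_by t s i => (s.length + 1, 0)
decreasing_by all_goals simp_wf <;> omega
-- `node.setdefault(c, {})` then recurse: replace child c in place, or append it
def childInsert : PChildren → Char → List Char → Nat → PChildren
  | .nil, c, cs, i => .cons c (trieInsert (.node none .nil) cs i) .nil
  | .cons c' t rest, c, cs, i =>
    if c' = c then .cons c' (trieInsert t cs i) rest
    else .cons c' t (childInsert rest c cs i)
termination_by ch c cs i => (cs.length + 1, sizeOf ch)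
decreasing_by all_goals simp_wf <;> omega
end

-- B's first loop: build the trie from the codebook, with a running index
def buildTrie (codebook : List String) : PTrie :=
  (codebook.foldl (fun st w => (trieInsert st.1 w.toList st.2, st.2 + 1))
    ((PTrie.node none .nil), (0 : Nat))).1

-- B's second loop; state = (decoded, current node), `none` = fell off the trie
def dehuffmanStepB (root : PTrie) (st : List Int × Option PTrie) (c : Char) :
    List Int × Option PTrie :=
  match st.2 with
  | none => st
  | some (.node _ ch) =>
    match findChild ch c with
    | none => (st.1, none)
    | some child =>
      match child with
      | .node (some i) _ => (st.1 ++ [(i : Int) + 1], some root)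
      | .node none _ => (st.1, some child)

def dehuffman_alt (encoded : String) (codebook : List String) : List Int :=
  let root := buildTrie codebook
  (encoded.toList.foldl (dehuffmanStepB root) ([], some root)).1

-- ===== PRECONDITION & SPEC =====
def Spec_dehuffman (encoded : String) (codebook : List String) (out : List Int) : Prop := out = dehuffman_alt encoded codebook
instance (encoded : String) (codebook : List String) (out : List Int) : Decidable (Spec_dehuffman encoded codebook out) := by unfold Spec_dehuffman; infer_instance

-- ===== CLAIM (what is proved, stated in full; the proofs are below) =====
def Claim_equal_dehuffman : Prop := ∀ (encoded : String) (codebook : List String), Dom_dehuffman encoded codebook → Spec_dehuffman encoded codebook (dehuffman encoded codebook)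

-- ===== LEMMAS AND PROOFS =====

def pvMark : PTrie → Option Nat
  | .node m _ => m

def pvWalk : PTrie → List Char → Option PTrie
  | t, [] => some t
  | .node _ ch, c :: cs =>
    match findChild ch c with
    | none => none
    | some t => pvWalk t cs

def pvMarkAt (t : PTrie) (s : List Char) : Option Nat :=
  (pvWalk t s).bind pvMark

def pvFirstIdxFrom : List String → List Char → Nat → Option Nat
  | [], _, _ => none
  | w :: ws, s, k => if w.toList = s then some k else pvFirstIdxFrom ws s (k + 1)

theorem pvWalk_append (s₁ s₂ : List Char) : ∀ t : PTrie,
    pvWalk t (s₁ ++ s₂) = (pvWalk t s₁).bind (fun u => pvWalk u s₂) := by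
  induction s₁ with
  | nil => intro t; simp [pvWalk]
  | cons c cs ih =>
    intro t
    match t with
    | .node m ch =>
      simp only [List.cons_append, pvWalk]
      cases findChild ch c with
      | none => simp
      | some u => simp [ih u]

theorem pvMarkAt_nil (m : Option Nat) (ch : PChildren) :
    pvMarkAt (.node m ch) [] = m := rfl

theorem pvMarkAt_cons (m : Option Nat) (ch : PChildren) (c : Char) (x : List Char) :
    pvMarkAt (.node m ch) (c :: x) = (findChild ch c).bind (fun u => pvMarkAt u x) := by
  cases h : findChild ch c <;> simp [pvMarkAt, pvWalk, h]

theorem pvMarkAt_empty (s : List Char) : pvMarkAt (.node none .nil) s = none := by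
  cases s with
  | nil => rfl
  | cons c cs => rw [pvMarkAt_cons]; simp [findChild]

theorem pvMarkAt_child (m : Option Nat) (ch : PChildren) (c : Char) (x : List Char) :
    pvMarkAt ((findChild ch c).getD (.node none .nil)) x = pvMarkAt (.node m ch) (c :: x) := by
  rw [pvMarkAt_cons]
  cases h : findChild ch c with
  | none => simp [pvMarkAt_empty]
  | some u => simp

theorem findChild_childInsert : ∀ (ch : PChildren) (c c' : Char) (cs : List Char) (i : Nat),
    findChild (childInsert ch c cs i) c' =
      if c = c' then some (trieInsert ((findChild ch c).getD (.node none .nil)) cs i)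
      else findChild ch c'
  | .nil, c, c', cs, i => by
    by_cases h : c = c' <;> simp [childInsert, findChild, h]
  | .cons a t rest, c, c', cs, i => by
    by_cases ha : a = c
    · subst ha
      by_cases h : a = c' <;> simp [childInsert, findChild, h]
    · by_cases h : a = c'
      · subst h
        simp [childInsert, findChild, ha, findChild_childInsert rest, Ne.symm ha]
      · simp [childInsert, findChild, ha, h, findChild_childInsert rest]

theorem pvMarkAt_trieInsert (s : List Char) : ∀ (s' : List Char) (t : PTrie) (i : Nat),
    pvMarkAt (trieInsert t s i) s' =
      if s' = s then (pvMarkAt t s).or (some i) else pvMarkAt t s' := by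
  induction s with
  | nil =>
    intro s' t i
    match t with
    | .node m ch =>
      cases s' with
      | nil =>
        rw [trieInsert, pvMarkAt_nil, pvMarkAt_nil, if_pos rfl]
        cases m <;> simp
      | cons c' cs' =>
        rw [trieInsert]
        rw [pvMarkAt_cons, pvMarkAt_cons]
        simp
  | cons c cs ih =>
    intro s' t i
    match t with
    | .node m ch =>
      cases s' with
      | nil =>
        rw [trieInsert, pvMarkAt_nil, pvMarkAt_nil, if_neg (by simp)]
      | cons c' cs' =>
        rw [trieInsert, pvMarkAt_cons, findChild_childInsert]
        by_cases hc : c = c'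
        · subst hc
          rw [if_pos rfl]
          simp only [Option.bind]
          rw [
            ih cs' ((findChild ch c).getD (.node none .nil)) i,
            pvMarkAt_child m ch c cs, pvMarkAt_child m ch c cs']
          by_cases hcs : cs' = cs
          · subst hcs; simp
          · simp [hcs]
        · rw [if_neg hc, ← pvMarkAt_cons]
          rw [if_neg (by simp [Ne.symm hc])]

theorem pvMarkAt_buildFold (ws : List String) : ∀ (t : PTrie) (k : Nat) (s : List Char),
    pvMarkAt ((ws.foldl (fun st w => (trieInsert st.1 w.toList st.2, st.2 + 1)) (t, k)).1) s
      = (pvMarkAt t s).or (pvFirstIdxFrom ws s k) := by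
  induction ws with
  | nil => intro t k s; simp [pvFirstIdxFrom]
  | cons w ws ih =>
    intro t k s
    simp only [List.foldl_cons, ih, pvFirstIdxFrom, pvMarkAt_trieInsert]
    by_cases h : w.toList = s
    · simp only [h, if_pos rfl, if_pos rfl]
      cases pvMarkAt t s <;> simp [Option.or]
    · have h' : s ≠ w.toList := fun hh => h hh.symm
      simp [h, h']

theorem pvMarkAt_build (codebook : List String) (s : List Char) :
    pvMarkAt (buildTrie codebook) s = pvFirstIdxFrom codebook s 0 := by
  simp [buildTrie, pvMarkAt_buildFold, pvMarkAt_empty]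

theorem pvFirstIdx_index? (s : List Char) : ∀ (ws : List String) (k : Nat),
    pvFirstIdxFrom ws s k = (PySem.List.index? ws (String.ofList s)).map (· + k) := by
  intro ws
  induction ws with
  | nil => intro k; simp [pvFirstIdxFrom, PySem.List.index?_eq_idxOf?]
  | cons w ws ih =>
    intro k
    by_cases h : w = String.ofList s
    · have ht : w.toList = s := by rw [h]; simp
      rw [pvFirstIdxFrom, if_pos ht, ← h, PySem.List.index?_cons_self]
      simp
    · have ht : w.toList ≠ s := by
        intro hh
        exact h (by apply String.ext; simpa using hh)
      rw [pvFirstIdxFrom, if_neg ht, PySem.List.index?_cons_of_ne ws h, ih (k + 1)]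
      cases PySem.List.index? ws (String.ofList s) <;> simp; omega

theorem pvMarkAt_root (codebook : List String) (s : List Char) :
    pvMarkAt (buildTrie codebook) s = PySem.List.index? codebook (String.ofList s) := by
  rw [pvMarkAt_build, pvFirstIdx_index?]
  cases PySem.List.index? codebook (String.ofList s) <;> simp

theorem pvPush_mk (s : List Char) (c : Char) : (String.ofList s).push c = String.ofList (s ++ [c]) := by
  apply String.ext; simp

theorem pvLoop (codebook : List String) (chars : List Char) :
    ∀ (dec : List Int) (s : List Char),
    (chars.foldl (dehuffmanStepB (buildTrie codebook)) (dec, pvWalk (buildTrie codebook) s)).1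
      = (chars.foldl (dehuffmanStepA codebook) (dec, String.ofList s)).1 := by
  induction chars with
  | nil => intro dec s; simp
  | cons c cs ih =>
    intro dec s
    have hwalk : pvWalk (buildTrie codebook) (s ++ [c])
        = (pvWalk (buildTrie codebook) s).bind (fun u => pvWalk u [c]) :=
      pvWalk_append s [c] _
    have hmark : pvMarkAt (buildTrie codebook) (s ++ [c])
        = PySem.List.index? codebook (String.ofList (s ++ [c])) := pvMarkAt_root _ _
    simp only [List.foldl_cons]
    have hA : dehuffmanStepA codebook (dec, String.ofList s) c =
        if codebook.contains (String.ofList (s ++ [c])) then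
          (dec ++ [(((PySem.List.index? codebook (String.ofList (s ++ [c]))).getD 0 : Nat) : Int) + 1], "")
        else (dec, String.ofList (s ++ [c])) := by
      simp [dehuffmanStepA, pvPush_mk]
    cases hw : pvWalk (buildTrie codebook) s with
    | none =>
      have hm : pvMarkAt (buildTrie codebook) (s ++ [c]) = none := by
        simp [pvMarkAt, hwalk, hw]
      have hnm : String.ofList (s ++ [c]) ∉ codebook := by
        rw [hm] at hmark
        exact (PySem.List.index?_eq_none_iff _ _).mp hmark.symm
      rw [hA, if_neg (by simp only [List.contains_iff_mem]; exact hnm)]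
      have hw' : pvWalk (buildTrie codebook) (s ++ [c]) = none := by simp [hwalk, hw]
      have := ih dec (s ++ [c])
      rw [hw'] at this
      simpa [dehuffmanStepB] using this
    | some t =>
      match t with
      | .node m ch =>
        cases hf : findChild ch c with
        | none =>
          have hw' : pvWalk (buildTrie codebook) (s ++ [c]) = none := by
            simp [hwalk, hw, pvWalk, hf]
          have hm : pvMarkAt (buildTrie codebook) (s ++ [c]) = none := by
            simp [pvMarkAt, hw']
          have hnm : String.ofList (s ++ [c]) ∉ codebook := by
            rw [hm] at hmark
            exact (PySem.List.index?_eq_none_iff _ _).mp hmark.symm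
          rw [hA, if_neg (by simp only [List.contains_iff_mem]; exact hnm)]
          have := ih dec (s ++ [c])
          rw [hw'] at this
          simpa [dehuffmanStepB, hf] using this
        | some child =>
          have hw' : pvWalk (buildTrie codebook) (s ++ [c]) = some child := by
            simp [hwalk, hw, pvWalk, hf]
          match child with
          | .node (some i) ch2 =>
            have hm : pvMarkAt (buildTrie codebook) (s ++ [c]) = some i := by
              simp [pvMarkAt, hw', pvMark]
            have hidx : PySem.List.index? codebook (String.ofList (s ++ [c])) = some i := by
              rw [← hmark, hm]
            have hmem : String.ofList (s ++ [c]) ∈ codebook :=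
              (PySem.List.index?_isSome_iff _ _).mp (by rw [hidx]; rfl)
            rw [hA, if_pos (List.elem_eq_true_of_mem hmem), hidx]
            have := ih (dec ++ [(i : Int) + 1]) []
            simp only [pvWalk] at this
            simpa [dehuffmanStepB, hf] using this
          | .node none ch2 =>
            have hm : pvMarkAt (buildTrie codebook) (s ++ [c]) = none := by
              simp [pvMarkAt, hw', pvMark]
            have hnm : String.ofList (s ++ [c]) ∉ codebook := by
              rw [hm] at hmark
              exact (PySem.List.index?_eq_none_iff _ _).mp hmark.symm
            rw [hA, if_neg (by simp only [List.contains_iff_mem]; exact hnm)]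
            have := ih dec (s ++ [c])
            rw [hw'] at this
            simpa [dehuffmanStepB, hf] using this

-- ===== VERDICT (by name: the statement is the Claim_ definition above) =====
theorem dehuffman_spec : Claim_equal_dehuffman := by
  intro encoded codebook _
  unfold Spec_dehuffman dehuffman dehuffman_alt
  have := pvLoop codebook encoded.toList [] []
  simp only [pvWalk] at this
  exact this.symm
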